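-- pv_equiv track=rewrite | github.com/qtop/qtop | oar.py | calculate_oar_state
-- ===== SOURCE A (Python) =====
-- def calculate_oar_state(jobid_state_lot, nr_of_jobs, node_state_mapping):
--     """
--     If all resource ids within the node are either alive or dead or suspected, the respective label is given to the node.
--     Otherwise, a mixed-state is reported
--     """
--     states = [job_state_tpl[1] for job_state_tpl in jobid_state_lot]
--     alive = states.count('Alive')
--     dead = states.count('Dead')
--     suspected = states.count('Suspected')
--
--     if bool(alive) + bool(dead) + bool(suspected) > 1:
--         state = node_state_mapping['mixed']
--         return state
--     else:
--         return node_state_mapping[states[0]]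
-- ===== SOURCE B (Python) =====
-- _KNOWN = frozenset(('Alive', 'Dead', 'Suspected'))
--
--
-- def calculate_oar_state(jobid_state_lot, nr_of_jobs, node_state_mapping):
--     """Early-exit conflict search: find the first known label, then short-circuit
--     on the first later known label that differs from it; no counts, no tally."""
--     states = [job_state_tpl[1] for job_state_tpl in jobid_state_lot]
--     first = next((s for s in states if s in _KNOWN), None)
--     mixed = first is not None and any(s != first and s in _KNOWN for s in states)
--     return node_state_mapping['mixed' if mixed else states[0]]
-- ===== Notes on version B (the rewrite author's own statement) =====
-- stated objective: alternative
-- what changed: Replaces A's exhaustive tally (three full .count() scans summed as booleans) by a short-circuiting witness search: find the first known label, then stop at the first later known label that differs from it ('mixed' iff such a conflicting pair exists).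
-- outside the precondition, e.g. on calculate_oar_state([('1', 'Alive')], 1, {}): A raises KeyError, B raises KeyError; on calculate_oar_state([], 0, {'mixed': 'm'}): A raises IndexError, B raises IndexError
import Mathlib
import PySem

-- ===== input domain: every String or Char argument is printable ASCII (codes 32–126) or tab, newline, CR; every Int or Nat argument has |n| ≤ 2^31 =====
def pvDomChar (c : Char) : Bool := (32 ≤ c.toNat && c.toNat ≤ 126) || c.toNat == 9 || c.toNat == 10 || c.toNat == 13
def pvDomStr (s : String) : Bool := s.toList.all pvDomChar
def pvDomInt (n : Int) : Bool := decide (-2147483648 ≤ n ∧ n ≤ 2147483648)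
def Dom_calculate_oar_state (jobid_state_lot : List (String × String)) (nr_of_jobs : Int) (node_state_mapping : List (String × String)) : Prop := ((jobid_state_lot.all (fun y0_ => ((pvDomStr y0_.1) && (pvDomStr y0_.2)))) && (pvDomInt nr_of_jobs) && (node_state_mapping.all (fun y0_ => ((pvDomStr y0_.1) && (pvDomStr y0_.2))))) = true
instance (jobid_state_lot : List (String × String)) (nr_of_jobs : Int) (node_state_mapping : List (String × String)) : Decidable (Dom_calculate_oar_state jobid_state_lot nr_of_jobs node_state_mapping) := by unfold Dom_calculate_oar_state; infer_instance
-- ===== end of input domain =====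

-- B replaces A's three-count tally by a short-circuiting conflict search (first known label vs any later different known label); return values proved equal on Pre_.


-- dict[k] lookup on the association list (first match); `.getD ""` totalises it — Pre_ guarantees the key is present
def dictGet? (m : List (String × String)) (k : String) : Option String :=
  (m.find? (fun p => p.1 == k)).map (·.2)

-- ===== PORT A =====
def calculate_oar_state (jobid_state_lot : List (String × String)) (nr_of_jobs : Int) (node_state_mapping : List (String × String)) : String :=
  let states := jobid_state_lot.map (fun t => t.2)
  let alive := states.count "Alive"
  let dead := states.count "Dead"
  let suspected := states.count "Suspected"
  if (if alive ≠ 0 then 1 else 0) + (if dead ≠ 0 then 1 else 0) + (if suspected ≠ 0 then (1 : Nat) else 0) > 1 then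
    (dictGet? node_state_mapping "mixed").getD ""
  else
    (dictGet? node_state_mapping (PySem.List.pyGetD states 0 "")).getD ""

-- ===== PORT B =====
def calculate_oar_state_alt (jobid_state_lot : List (String × String)) (nr_of_jobs : Int) (node_state_mapping : List (String × String)) : String :=
  let states := jobid_state_lot.map (fun t => t.2)
  let first := states.find? (fun s => ["Alive", "Dead", "Suspected"].contains s)
  let mixed := match first with
    | none => false
    | some f => states.any (fun s => (s != f) && ["Alive", "Dead", "Suspected"].contains s)
  (dictGet? node_state_mapping (if mixed then "mixed" else PySem.List.pyGetD states 0 "")).getD ""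

-- ===== PRECONDITION & SPEC =====
-- Pre_ excludes exactly the inputs where Python A raises: empty jobid_state_lot (IndexError on states[0])
-- and a node_state_mapping missing the key that is looked up (KeyError).
def Pre_calculate_oar_state (jobid_state_lot : List (String × String)) (nr_of_jobs : Int) (node_state_mapping : List (String × String)) : Prop :=
  jobid_state_lot ≠ [] ∧
  (if ((["Alive", "Dead", "Suspected"].filter (fun k => (jobid_state_lot.map Prod.snd).contains k)).length > 1)
   then "mixed" ∈ node_state_mapping.map Prod.fst
   else (jobid_state_lot.map Prod.snd).getD 0 "" ∈ node_state_mapping.map Prod.fst)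
instance (jobid_state_lot : List (String × String)) (nr_of_jobs : Int) (node_state_mapping : List (String × String)) : Decidable (Pre_calculate_oar_state jobid_state_lot nr_of_jobs node_state_mapping) := by unfold Pre_calculate_oar_state; infer_instance
def pvWitness_calculate_oar_state : (List (String × String)) × Int × (List (String × String)) :=
  ([("1", "Alive"), ("2", "Alive")], 2, [("Alive", "free"), ("mixed", "mix")])
def Spec_calculate_oar_state (jobid_state_lot : List (String × String)) (nr_of_jobs : Int) (node_state_mapping : List (String × String)) (out : String) : Prop := out = calculate_oar_state_alt jobid_state_lot nr_of_jobs node_state_mapping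
instance (jobid_state_lot : List (String × String)) (nr_of_jobs : Int) (node_state_mapping : List (String × String)) (out : String) : Decidable (Spec_calculate_oar_state jobid_state_lot nr_of_jobs node_state_mapping out) := by unfold Spec_calculate_oar_state; infer_instance

-- ===== CLAIM (what is proved, stated in full; the proofs are below) =====
def Claim_equal_calculate_oar_state : Prop := ∀ (jobid_state_lot : List (String × String)) (nr_of_jobs : Int) (node_state_mapping : List (String × String)), Dom_calculate_oar_state jobid_state_lot nr_of_jobs node_state_mapping → Pre_calculate_oar_state jobid_state_lot nr_of_jobs node_state_mapping → Spec_calculate_oar_state jobid_state_lot nr_of_jobs node_state_mapping (calculate_oar_state jobid_state_lot nr_of_jobs node_state_mapping)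

-- ===== LEMMAS AND PROOFS =====

-- A's bool-sum equals the number of known labels occurring in states
theorem bool_sum_eq (states : List String) :
    ((if states.count "Alive" ≠ 0 then 1 else 0) + (if states.count "Dead" ≠ 0 then 1 else 0)
        + (if states.count "Suspected" ≠ 0 then (1 : Nat) else 0))
      = ((["Alive", "Dead", "Suspected"] : List String).filter (fun k => states.contains k)).length := by
  by_cases hA : "Alive" ∈ states <;> by_cases hD : "Dead" ∈ states <;> by_cases hS : "Suspected" ∈ states <;>
    simp [List.count_eq_zero, List.contains_eq_mem, hA, hD, hS]

-- "at least two known labels occur" as a pair of distinct known elements of states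
theorem two_iff (states : List String) :
    1 < ((["Alive", "Dead", "Suspected"] : List String).filter (fun k => states.contains k)).length ↔
      ∃ a b, a ≠ b ∧ a ∈ states ∧ b ∈ states ∧
        (["Alive", "Dead", "Suspected"] : List String).contains a = true ∧
        (["Alive", "Dead", "Suspected"] : List String).contains b = true := by
  by_cases hA : "Alive" ∈ states <;> by_cases hD : "Dead" ∈ states <;> by_cases hS : "Suspected" ∈ states <;>
    simp only [List.filter, List.contains_eq_mem, hA, hD, hS, decide_true, decide_false,
      List.length, List.mem_cons, List.not_mem_nil, decide_eq_true_eq] <;>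
  constructor <;> intro h
  all_goals first
    | omega
    | exact ⟨"Alive", "Dead", by decide, hA, hD, by decide, by decide⟩
    | exact ⟨"Alive", "Suspected", by decide, hA, hS, by decide, by decide⟩
    | exact ⟨"Dead", "Suspected", by decide, hD, hS, by decide, by decide⟩
    | (obtain ⟨a, b, hab, ha, hb, hka, hkb⟩ := h
       simp only [or_false] at hka hkb
       rcases hka with rfl | rfl | rfl <;> rcases hkb with rfl | rfl | rfl <;> simp_all)

-- B's mixed flag holds exactly when two distinct known elements occur in states
theorem mixed_iff (states : List String) :
    ((match states.find? (fun s => ["Alive", "Dead", "Suspected"].contains s) with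
      | none => false
      | some f => states.any (fun s => (s != f) && ["Alive", "Dead", "Suspected"].contains s)) = true) ↔
      ∃ a b, a ≠ b ∧ a ∈ states ∧ b ∈ states ∧
        (["Alive", "Dead", "Suspected"] : List String).contains a = true ∧
        (["Alive", "Dead", "Suspected"] : List String).contains b = true := by
  constructor
  · intro h
    cases hf : states.find? (fun s => ["Alive", "Dead", "Suspected"].contains s) with
    | none => rw [hf] at h; simp at h
    | some f =>
      rw [hf] at h
      obtain ⟨s, hs, hsp⟩ := List.any_eq_true.mp h
      simp only [Bool.and_eq_true, bne_iff_ne] at hsp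
      exact ⟨s, f, hsp.1, hs, List.mem_of_find?_eq_some hf, hsp.2, List.find?_some hf⟩
  · rintro ⟨a, b, hab, ha, hb, hka, hkb⟩
    cases hf : states.find? (fun s => ["Alive", "Dead", "Suspected"].contains s) with
    | none => exact absurd hka (List.find?_eq_none.mp hf a ha)
    | some f =>
      simp only
      by_cases haf : a = f
      · subst haf
        exact List.any_eq_true.mpr ⟨b, hb, Bool.and_eq_true_iff.mpr ⟨bne_iff_ne.mpr (Ne.symm hab), hkb⟩⟩
      · exact List.any_eq_true.mpr ⟨a, ha, Bool.and_eq_true_iff.mpr ⟨bne_iff_ne.mpr haf, hka⟩⟩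

-- ===== VERDICT (by name: the statement is the Claim_ definition above) =====
theorem calculate_oar_state_spec : Claim_equal_calculate_oar_state := by
  intro lot nr m _ _
  unfold Spec_calculate_oar_state calculate_oar_state calculate_oar_state_alt
  simp only [bool_sum_eq, gt_iff_lt]
  by_cases h : 1 < ((["Alive", "Dead", "Suspected"] : List String).filter
      (fun k => (lot.map (fun t => t.2)).contains k)).length
  · have hm : (match (lot.map (fun t => t.2)).find? (fun s => ["Alive", "Dead", "Suspected"].contains s) with
      | none => false
      | some f => (lot.map (fun t => t.2)).any (fun s => (s != f) && ["Alive", "Dead", "Suspected"].contains s)) = true :=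
      (mixed_iff _).mpr ((two_iff _).mp h)
    simp only [if_pos h, hm, if_true]
  · have hm : (match (lot.map (fun t => t.2)).find? (fun s => ["Alive", "Dead", "Suspected"].contains s) with
      | none => false
      | some f => (lot.map (fun t => t.2)).any (fun s => (s != f) && ["Alive", "Dead", "Suspected"].contains s)) = false :=
      Bool.eq_false_iff.mpr (fun hc => h ((two_iff _).mpr ((mixed_iff _).mp hc)))
    simp only [if_neg h, hm, Bool.false_eq_true, if_false]
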